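-- pv_equiv track=rewrite | github.com/mzwawann/Praktikum-Alpro | Pertemuan 09 - PENGOLAHAN STRING DAN REGULAR EXPRESSION/Latihan_8.4.py | cari_kata
-- ===== SOURCE A (Python) =====
-- def cari_kata(kalimat):
--     kalimat = kalimat.lower()
--     kata_list = kalimat.split()
--
--     terpendek = kata_list[0]
--     terpanjang = kata_list[0]
--
--     for kata in kata_list:
--         if len(kata) < len(terpendek):
--             terpendek = kata
--         if len(kata) > len(terpanjang):
--             terpanjang = kata
--
--     return terpendek, terpanjang
-- ===== SOURCE B (Python) =====
-- def cari_kata(kalimat):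
--     by_len = {}
--     for kata in kalimat.lower().split():
--         if len(kata) not in by_len:
--             by_len[len(kata)] = kata
--     return by_len[min(by_len)], by_len[max(by_len)]
-- ===== Notes on version B (the rewrite author's own statement) =====
-- stated objective: alternative
-- what changed: Instead of A's pair-accumulator comparison loop, B builds a dict indexing each word length to its first word, then answers with min/max over the length keys, which reproduces A's first-occurrence tie-breaking.
import Mathlib
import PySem

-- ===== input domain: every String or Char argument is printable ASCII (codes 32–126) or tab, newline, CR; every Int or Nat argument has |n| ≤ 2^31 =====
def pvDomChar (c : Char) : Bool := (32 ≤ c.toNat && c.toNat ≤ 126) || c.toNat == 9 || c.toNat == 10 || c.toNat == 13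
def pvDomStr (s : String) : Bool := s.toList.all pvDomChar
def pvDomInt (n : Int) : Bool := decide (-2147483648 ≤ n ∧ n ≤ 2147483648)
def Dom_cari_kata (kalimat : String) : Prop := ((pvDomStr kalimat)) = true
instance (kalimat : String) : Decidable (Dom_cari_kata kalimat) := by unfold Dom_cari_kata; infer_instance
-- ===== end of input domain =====

-- B indexes each word length to its first word in a dict and answers by min/max over the length keys, instead of A's pair-accumulator comparison loop (alternative algorithm, same O(n) scan plus a key pass).


-- ===== PORT A =====
def cari_kata (kalimat : String) : String × String :=
  let kalimat := PySem.Str.lower kalimat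
  let kata_list := PySem.Str.split₀ kalimat
  let terpendek := (PySem.List.pyGet? kata_list 0).getD ""   -- kata_list[0]; Pre_ excludes the IndexError case
  let terpanjang := (PySem.List.pyGet? kata_list 0).getD ""
  kata_list.foldl (fun (st : String × String) kata =>
    let terpendek := if PySem.Str.len kata < PySem.Str.len st.1 then kata else st.1
    let terpanjang := if PySem.Str.len st.2 < PySem.Str.len kata then kata else st.2
    (terpendek, terpanjang)) (terpendek, terpanjang)

-- ===== PORT B =====
def cari_kata_alt (kalimat : String) : String × String :=
  let kata_list := PySem.Str.split₀ (PySem.Str.lower kalimat)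
  let by_len := kata_list.foldl (fun (d : PySem.Dict Int String) kata =>
      if d.contains (PySem.Str.len kata) then d
      else d.insert (PySem.Str.len kata) kata) PySem.Dict.empty
  let mn := (PySem.List.min? by_len.keys (fun k => k)).getD 0   -- min(by_len); empty dict (ValueError) excluded by Pre_
  let mx := (PySem.List.max? by_len.keys (fun k => k)).getD 0
  ((by_len.get? mn).getD "", (by_len.get? mx).getD "")          -- by_len[mn], by_len[mx]; keys present by construction

-- ===== PRECONDITION & SPEC =====
-- Pre_ excludes only whitespace-only/empty sentences, on which A raises IndexError (kata_list[0]) and B raises ValueError (min of empty dict).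
def Pre_cari_kata (kalimat : String) : Prop :=
  PySem.Str.split₀ (PySem.Str.lower kalimat) ≠ []
instance (kalimat : String) : Decidable (Pre_cari_kata kalimat) := by unfold Pre_cari_kata; infer_instance
def pvWitness_cari_kata : String := "Halo dunia Lean"

def Spec_cari_kata (kalimat : String) (out : String × String) : Prop := out = cari_kata_alt kalimat
instance (kalimat : String) (out : String × String) : Decidable (Spec_cari_kata kalimat out) := by unfold Spec_cari_kata; infer_instance

-- ===== CLAIM (what is proved, stated in full; the proofs are below) =====
def Claim_equal_cari_kata : Prop := ∀ (kalimat : String), Dom_cari_kata kalimat → Pre_cari_kata kalimat → Spec_cari_kata kalimat (cari_kata kalimat)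

-- ===== LEMMAS AND PROOFS =====

-- the invariant tying B's dict to A's running pair: min/max length key holds exactly A's current word
def KInv (d : PySem.Dict Int String) (p l : String) : Prop :=
  PySem.List.min? d.keys (fun k => k) = some (PySem.Str.len p) ∧
  d.get? (PySem.Str.len p) = some p ∧
  PySem.List.max? d.keys (fun k => k) = some (PySem.Str.len l) ∧
  d.get? (PySem.Str.len l) = some l

theorem minAppend (ks : List Int) (m k : Int) (h : PySem.List.min? ks (fun k => k) = some m) :
    PySem.List.min? (ks ++ [k]) (fun k => k) = some (if k < m then k else m) := by
  rcases ks with _ | ⟨x, t⟩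
  · simp [PySem.List.min?] at h
  · rw [PySem.List.min?_id_cons] at h
    rw [List.cons_append, PySem.List.min?_id_cons, List.foldl_append]
    injection h with h
    simp only [List.foldl, h]
    congr 1
    rw [min_def]; split_ifs <;> omega

theorem maxAppend (ks : List Int) (m k : Int) (h : PySem.List.max? ks (fun k => k) = some m) :
    PySem.List.max? (ks ++ [k]) (fun k => k) = some (if m < k then k else m) := by
  rcases ks with _ | ⟨x, t⟩
  · simp [PySem.List.max?] at h
  · rw [PySem.List.max?_id_cons] at h
    rw [List.cons_append, PySem.List.max?_id_cons, List.foldl_append]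
    injection h with h
    simp only [List.foldl, h]
    congr 1
    rw [max_def]; split_ifs <;> omega

-- one loop step preserves the invariant
theorem step (d : PySem.Dict Int String) (p l w : String) (h : KInv d p l) :
    KInv (if d.contains (PySem.Str.len w) then d else d.insert (PySem.Str.len w) w)
        (if PySem.Str.len w < PySem.Str.len p then w else p)
        (if PySem.Str.len l < PySem.Str.len w then w else l) := by
  obtain ⟨h1, h2, h3, h4⟩ := h
  by_cases hc : d.contains (PySem.Str.len w) = true
  · have hmem : PySem.Str.len w ∈ d.keys := (PySem.Dict.contains_iff_mem_keys _ _).mp hc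
    have hple : PySem.Str.len p ≤ PySem.Str.len w := PySem.List.min?_isMin h1 _ hmem
    have hlge : PySem.Str.len w ≤ PySem.Str.len l := PySem.List.max?_isMax h3 _ hmem
    rw [if_pos hc, if_neg (by omega), if_neg (by omega)]
    exact ⟨h1, h2, h3, h4⟩
  · have hc' : d.contains (PySem.Str.len w) = false := by
      cases hcv : d.contains (PySem.Str.len w) <;> simp_all
    have hkeys : (d.insert (PySem.Str.len w) w).keys = d.keys ++ [PySem.Str.len w] :=
      PySem.Dict.keys_insert_of_not_contains _ _ hc'
    have hnep : PySem.Str.len p ≠ PySem.Str.len w := by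
      intro he
      rw [← he] at hc'
      have := PySem.Dict.contains_eq_isSome_get? d (PySem.Str.len p)
      rw [h2, hc'] at this; simp at this
    have hnel : PySem.Str.len l ≠ PySem.Str.len w := by
      intro he
      rw [← he] at hc'
      have := PySem.Dict.contains_eq_isSome_get? d (PySem.Str.len l)
      rw [h4, hc'] at this; simp at this
    rw [if_neg hc]
    refine ⟨?_, ?_, ?_, ?_⟩
    · rw [hkeys, minAppend _ _ _ h1, apply_ite PySem.Str.len]
    · by_cases hlt : PySem.Str.len w < PySem.Str.len p
      · rw [if_pos hlt]; exact PySem.Dict.get?_insert_self _ _ _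
      · rw [if_neg hlt]
        rw [PySem.Dict.get?_insert_of_ne _ _ hnep]; exact h2
    · rw [hkeys, maxAppend _ _ _ h3, apply_ite PySem.Str.len]
    · by_cases hlt : PySem.Str.len l < PySem.Str.len w
      · rw [if_pos hlt]; exact PySem.Dict.get?_insert_self _ _ _
      · rw [if_neg hlt]
        rw [PySem.Dict.get?_insert_of_ne _ _ hnel]; exact h4

theorem loop (t : List String) (d : PySem.Dict Int String) (p l : String) (h : KInv d p l) :
    KInv (t.foldl (fun d kata => if d.contains (PySem.Str.len kata) then d
                                else d.insert (PySem.Str.len kata) kata) d)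
        (t.foldl (fun m y => if PySem.Str.len y < PySem.Str.len m then y else m) p)
        (t.foldl (fun m y => if PySem.Str.len m < PySem.Str.len y then y else m) l) := by
  induction t generalizing d p l with
  | nil => exact h
  | cons x t ih => exact ih _ _ _ (step _ _ _ _ h)

-- A's pair-state fold is the pair of the two single-state folds.
theorem pairfold (t : List String) (p l : String) :
    t.foldl (fun (st : String × String) kata =>
      (if PySem.Str.len kata < PySem.Str.len st.1 then kata else st.1,
       if PySem.Str.len st.2 < PySem.Str.len kata then kata else st.2)) (p, l)
    = (t.foldl (fun m y => if PySem.Str.len y < PySem.Str.len m then y else m) p,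
       t.foldl (fun m y => if PySem.Str.len m < PySem.Str.len y then y else m) l) := by
  induction t generalizing p l with
  | nil => rfl
  | cons x t ih => simp only [List.foldl_cons]; exact ih _ _

-- ===== VERDICT (by name: the statement is the Claim_ definition above) =====
theorem cari_kata_spec : Claim_equal_cari_kata := by
  intro kalimat _ hpre
  unfold Spec_cari_kata cari_kata cari_kata_alt
  unfold Pre_cari_kata at hpre
  rcases hw : PySem.Str.split₀ (PySem.Str.lower kalimat) with _ | ⟨w, t⟩
  · exact absurd hw hpre
  · have h0 : PySem.List.pyGet? (w :: t) 0 = some w := by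
      simp [PySem.List.pyGet?, PySem.List.pyIdx?]
    have hce : (PySem.Dict.empty : PySem.Dict Int String).contains (PySem.Str.len w) = false :=
      PySem.Dict.contains_empty _
    have hd0 : ((PySem.Dict.empty : PySem.Dict Int String).insert (PySem.Str.len w) w).keys
        = [PySem.Str.len w] := by
      rw [PySem.Dict.keys_insert_of_not_contains _ _ hce, PySem.Dict.keys_empty]; rfl
    have hinv : KInv ((PySem.Dict.empty : PySem.Dict Int String).insert (PySem.Str.len w) w) w w := by
      refine ⟨?_, PySem.Dict.get?_insert_self _ _ _, ?_, PySem.Dict.get?_insert_self _ _ _⟩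
      · rw [hd0, PySem.List.min?_id_cons]; rfl
      · rw [hd0, PySem.List.max?_id_cons]; rfl
    simp only [hw, h0, Option.getD_some, List.foldl_cons, lt_irrefl, if_false, hce,
      Bool.false_eq_true]
    rw [pairfold]
    obtain ⟨h1, h2, h3, h4⟩ := loop t _ w w hinv
    rw [h1, h3]
    simp only [Option.getD_some]
    rw [h2, h4]
    rfl
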